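-- pv_equiv track=rewrite | github.com/arielgamino/pycharm_fellowshipapi | util/features.py | get_most_frequent_ending_of_words
-- ===== SOURCE A (Python) =====
-- from collections import Counter
--
-- def get_most_frequent_ending_of_words(tokenized_text,number_of_characters):
--     ending_counter = Counter()
--
--     for n in tokenized_text:
--         ending_counter[n[-number_of_characters:]] += 1
--
--     most_common = ending_counter.most_common(10)
--     most_common_list = []
--     for l in most_common:
--         most_common_list.append(l)
--
--     return most_common_list
-- ===== SOURCE B (Python) =====
-- def get_most_frequent_ending_of_words(tokenized_text, number_of_characters):
--     counts = {}
--     for w in tokenized_text: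
--         e = w[-number_of_characters:]
--         counts[e] = counts.get(e, 0) + 1
--     items = list(counts.items())
--     result = []
--     while items and len(result) < 10:
--         best = max(items, key=lambda kv: kv[1])
--         items.remove(best)
--         result.append(best)
--     return result
-- ===== Notes on version B (the rewrite author's own statement) =====
-- stated objective: alternative
-- what changed: Counter + most_common(10) plus a redundant copy loop is replaced by a plain counting dict followed by top-10 selection via repeated extraction of the first maximum (selection instead of sorting); tie-breaking by first insertion order is preserved.
import Mathlib
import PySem

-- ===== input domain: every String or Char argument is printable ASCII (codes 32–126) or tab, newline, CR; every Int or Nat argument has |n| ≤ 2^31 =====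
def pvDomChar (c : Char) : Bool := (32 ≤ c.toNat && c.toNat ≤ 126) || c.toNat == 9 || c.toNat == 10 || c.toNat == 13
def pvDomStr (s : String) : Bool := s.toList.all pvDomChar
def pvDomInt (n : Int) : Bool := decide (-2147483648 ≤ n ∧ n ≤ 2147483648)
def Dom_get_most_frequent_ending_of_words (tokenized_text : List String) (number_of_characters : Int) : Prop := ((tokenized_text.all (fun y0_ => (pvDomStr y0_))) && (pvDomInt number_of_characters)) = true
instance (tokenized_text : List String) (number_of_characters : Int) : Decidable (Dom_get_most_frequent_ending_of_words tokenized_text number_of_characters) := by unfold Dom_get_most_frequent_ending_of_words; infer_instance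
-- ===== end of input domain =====

-- B replaces Counter + most_common(10) by a plain counting dict followed by top-10
-- selection via repeated first-maximum extraction (objective: alternative, same cost).

-- ===== PORT A =====
def get_most_frequent_ending_of_words (tokenized_text : List String) (number_of_characters : Int) : List (String × Int) :=
  -- ending_counter = Counter(); for n: ending_counter[n[-number_of_characters:]] += 1
  let ending_counter : PySem.Dict String Int :=
    tokenized_text.foldl
      (fun d n => d.modify (PySem.Str.slice n (some (-number_of_characters)) none) 0 (· + 1))
      PySem.Dict.empty
  -- most_common = ending_counter.most_common(10)  (stable sort by count, descending, first 10)
  let most_common := (PySem.List.sorted ending_counter.items (fun kv => kv.2) true).take 10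
  -- copy loop: most_common_list.append(l)
  most_common.foldl (fun acc l => acc ++ [l]) []

-- ===== PORT B =====
-- while items and len(result) < 10: best = max(items, key=snd); items.remove(best); result.append(best)
def pvSelectTop : Nat → List (String × Int) → List (String × Int)
  | 0, _ => []
  | n + 1, items =>
    match PySem.List.max? items (fun kv => kv.2) with
    | none => []
    | some best => best :: pvSelectTop n ((PySem.List.remove? items best).getD [])

def get_most_frequent_ending_of_words_alt (tokenized_text : List String) (number_of_characters : Int) : List (String × Int) :=
  let counts : PySem.Dict String Int :=
    tokenized_text.foldl
      (fun d w =>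
        let e := PySem.Str.slice w (some (-number_of_characters)) none
        d.insert e (d.getD e 0 + 1))
      PySem.Dict.empty
  pvSelectTop 10 counts.items

-- ===== PRECONDITION & SPEC =====
def Spec_get_most_frequent_ending_of_words (tokenized_text : List String) (number_of_characters : Int) (out : List (String × Int)) : Prop := out = get_most_frequent_ending_of_words_alt tokenized_text number_of_characters
instance (tokenized_text : List String) (number_of_characters : Int) (out : List (String × Int)) : Decidable (Spec_get_most_frequent_ending_of_words tokenized_text number_of_characters out) := by unfold Spec_get_most_frequent_ending_of_words; infer_instance

-- ===== CLAIM (what is proved, stated in full; the proofs are below) =====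
def Claim_equal_get_most_frequent_ending_of_words : Prop := ∀ (tokenized_text : List String) (number_of_characters : Int), Dom_get_most_frequent_ending_of_words tokenized_text number_of_characters → Spec_get_most_frequent_ending_of_words tokenized_text number_of_characters (get_most_frequent_ending_of_words tokenized_text number_of_characters)

-- ===== LEMMAS AND PROOFS =====

-- max? over xs ++ [y] is one more step of the running strict-improvement fold.
theorem pv_max?_append_singleton (xs : List (String × Int)) (y : String × Int) :
    PySem.List.max? (xs ++ [y]) (fun kv => kv.2) =
      match PySem.List.max? xs (fun kv => kv.2) with
      | none => some y
      | some m => if m.2 < y.2 then some y else some m := by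
  cases h : PySem.List.max? xs (fun kv => kv.2) with
  | none =>
    simp only [PySem.List.max?] at h
    simp only [PySem.List.max?, List.foldl_append, List.foldl_cons, List.foldl_nil, h]
  | some m =>
    simp only [PySem.List.max?] at h
    simp only [PySem.List.max?, List.foldl_append, List.foldl_cons, List.foldl_nil, h]

-- sorted (xs ++ [y]) inserts y into sorted xs (the insertion-sort fold, one step).
theorem pv_sorted_append_singleton (xs : List (String × Int)) (y : String × Int) :
    PySem.List.sorted (xs ++ [y]) (fun kv => kv.2) true =
      PySem.List.insertBy (fun a b => decide (b.2 < a.2)) y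
        (PySem.List.sorted xs (fun kv => kv.2) true) := by
  rw [PySem.List.sorted_rev_eq_foldl_insertBy, PySem.List.sorted_rev_eq_foldl_insertBy,
    List.foldl_append]
  rfl

-- Stable descending sort starts with the FIRST maximum, followed by the sort of the rest.
theorem pv_sorted_rev_cons_max (l : List (String × Int)) (m : String × Int)
    (hm : PySem.List.max? l (fun kv => kv.2) = some m) :
    PySem.List.sorted l (fun kv => kv.2) true =
      m :: PySem.List.sorted (l.erase m) (fun kv => kv.2) true := by
  induction l using List.reverseRecOn generalizing m with
  | nil => simp [PySem.List.max?] at hm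
  | append_singleton l' y ih =>
    rw [pv_max?_append_singleton] at hm
    cases hl' : PySem.List.max? l' (fun kv => kv.2) with
    | none =>
      rw [hl'] at hm
      have hl : l' = [] := (PySem.List.max?_eq_none_iff _ _).mp hl'
      simp only [] at hm
      injection hm with hm
      subst hl
      subst hm
      simp [PySem.List.sorted, PySem.List.insertBy]
    | some m' =>
      rw [hl'] at hm
      have hmem : m' ∈ l' := PySem.List.max?_mem hl'
      by_cases hlt : m'.2 < y.2
      · simp only [if_pos hlt] at hm
        injection hm with hm
        subst hm
        have hnot : y ∉ l' := by
          intro hin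
          have := PySem.List.max?_isMax hl' y hin
          omega
        rw [pv_sorted_append_singleton, List.erase_append_right _ hnot, ih m' hl']
        simp [PySem.List.insertBy, hlt]
        exact (ih m' hl').symm
      · simp only [if_neg hlt] at hm
        injection hm with hm
        subst hm
        rw [pv_sorted_append_singleton, ih m' hl', List.erase_append_left _ hmem,
          pv_sorted_append_singleton]
        simp [PySem.List.insertBy, hlt]

-- Repeated first-max extraction computes the first n elements of the stable descending sort.
theorem pv_selectTop_eq (n : Nat) (l : List (String × Int)) :
    pvSelectTop n l = (PySem.List.sorted l (fun kv => kv.2) true).take n := by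
  induction n generalizing l with
  | zero => simp [pvSelectTop]
  | succ n ih =>
    cases hmax : PySem.List.max? l (fun kv => kv.2) with
    | none =>
      have hl : l = [] := (PySem.List.max?_eq_none_iff _ _).mp hmax
      subst hl
      simp [pvSelectTop, PySem.List.max?, PySem.List.sorted]
    | some m =>
      have hmem : m ∈ l := PySem.List.max?_mem hmax
      rw [pv_sorted_rev_cons_max l m hmax]
      simp only [pvSelectTop, hmax, PySem.List.remove?_eq_some_erase l m hmem, Option.getD_some,
        List.take_succ_cons]
      rw [ih]

-- ===== VERDICT (by name: the statement is the Claim_ definition above) =====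
theorem get_most_frequent_ending_of_words_spec : Claim_equal_get_most_frequent_ending_of_words := by
  intro tokenized_text number_of_characters _
  unfold Spec_get_most_frequent_ending_of_words
  unfold get_most_frequent_ending_of_words get_most_frequent_ending_of_words_alt
  have hsuffix : ∀ (f : PySem.Dict String Int → String → PySem.Dict String Int),
      tokenized_text.foldl (fun d w => f d (PySem.Str.slice w (some (-number_of_characters)) none)) PySem.Dict.empty
        = (tokenized_text.map (fun w => PySem.Str.slice w (some (-number_of_characters)) none)).foldl f PySem.Dict.empty := by
    intro f; rw [List.foldl_map]
  simp only []
  rw [hsuffix (fun d n => d.modify n 0 (· + 1)),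
      hsuffix (fun d e => d.insert e (d.getD e 0 + 1)),
      ← PySem.Dict.counter_eq_foldl, PySem.Dict.foldl_insert_getD_add_one_eq_counter]
  rw [PySem.List.foldl_append_singleton_eq_self, pv_selectTop_eq]
  rfl
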